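-- pv_equiv track=rewrite | github.com/ramkumarravi49/TET | spikes_TET_layer.py | standardize_layer_name
-- ===== SOURCE A (Python) =====
-- def standardize_layer_name(name: str):
--     replacements = {
--         "layer1": "block1",
--         "layer2": "block2",
--         "layer3": "block3",
--         "layer4": "block4",
--         "spike": "act"
--     }
--     parts = name.split(".")
--     for k, v in replacements.items():
--         parts = [p.replace(k, v) for p in parts]
--     return ".".join(parts)
-- ===== SOURCE B (Python) =====
-- def standardize_layer_name(name: str):
--     # one left-to-right scan; at each position emit the replacement for the key
--     # that starts there (if any) and jump over it, else copy one character
--     out = []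
--     i = 0
--     n = len(name)
--     while i < n:
--         if name.startswith("layer1", i):
--             out.append("block1"); i += 6
--         elif name.startswith("layer2", i):
--             out.append("block2"); i += 6
--         elif name.startswith("layer3", i):
--             out.append("block3"); i += 6
--         elif name.startswith("layer4", i):
--             out.append("block4"); i += 6
--         elif name.startswith("spike", i):
--             out.append("act"); i += 5
--         else:
--             out.append(name[i]); i += 1
--     return "".join(out)
-- ===== Notes on version B (the rewrite author's own statement) =====
-- stated objective: alternative
-- what changed: A splits the name at the dot separator, runs five sequential full-string replace passes over all the parts and re-joins them; B makes a single left-to-right scan that at each position emits the replacement of whichever key starts there (or copies the character), so the split/join and the five repeated passes disappear; it trades A's C-implemented str.replace calls for one explicit Python loop.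
import Mathlib
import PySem

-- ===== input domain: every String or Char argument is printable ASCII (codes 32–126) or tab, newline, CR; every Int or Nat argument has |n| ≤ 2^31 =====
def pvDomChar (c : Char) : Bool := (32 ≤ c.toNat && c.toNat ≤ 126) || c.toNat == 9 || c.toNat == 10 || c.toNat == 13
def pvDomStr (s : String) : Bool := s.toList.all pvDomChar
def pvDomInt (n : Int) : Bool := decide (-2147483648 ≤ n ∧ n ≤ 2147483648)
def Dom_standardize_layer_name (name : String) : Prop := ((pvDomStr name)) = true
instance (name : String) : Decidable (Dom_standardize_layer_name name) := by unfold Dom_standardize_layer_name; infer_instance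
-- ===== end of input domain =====

-- B replaces A's split-at-the-separator plus five sequential full-string replace passes
-- by ONE left-to-right scan that, at each position, emits the replacement of the key
-- starting there (if any) and jumps over it; objective: alternative single-pass algorithm.

-- ===== PORT A =====
def standardize_layer_name (name : String) : String :=
  let replacements : List (String × String) :=
    [("layer1", "block1"), ("layer2", "block2"), ("layer3", "block3"),
     ("layer4", "block4"), ("spike", "act")]
  let parts := PySem.Chars.splitOn name.toList ['.']
  let parts := replacements.foldl
    (fun ps kv => ps.map (fun p => PySem.Chars.replace p kv.1.toList kv.2.toList)) parts
  String.ofList (PySem.Chars.join ['.'] parts)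

-- ===== PORT B =====
-- helper for B: the while loop of Source B as structural recursion on the remaining chars
def pvScan : List Char → List Char
  | [] => []
  | c :: t =>
    if ['l','a','y','e','r','1'].isPrefixOf (c :: t) then ['b','l','o','c','k','1'] ++ pvScan (t.drop 5)
    else if ['l','a','y','e','r','2'].isPrefixOf (c :: t) then ['b','l','o','c','k','2'] ++ pvScan (t.drop 5)
    else if ['l','a','y','e','r','3'].isPrefixOf (c :: t) then ['b','l','o','c','k','3'] ++ pvScan (t.drop 5)
    else if ['l','a','y','e','r','4'].isPrefixOf (c :: t) then ['b','l','o','c','k','4'] ++ pvScan (t.drop 5)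
    else if ['s','p','i','k','e'].isPrefixOf (c :: t) then ['a','c','t'] ++ pvScan (t.drop 4)
    else c :: pvScan t
termination_by s => s.length
decreasing_by
  all_goals simp [List.length_drop]

def standardize_layer_name_alt (name : String) : String :=
  String.ofList (pvScan name.toList)

-- ===== PRECONDITION & SPEC =====
def Spec_standardize_layer_name (name : String) (out : String) : Prop := out = standardize_layer_name_alt name
instance (name : String) (out : String) : Decidable (Spec_standardize_layer_name name out) := by unfold Spec_standardize_layer_name; infer_instance

-- ===== CLAIM (what is proved, stated in full; the proofs are below) =====
def Claim_equal_standardize_layer_name : Prop := ∀ (name : String), Dom_standardize_layer_name name → Spec_standardize_layer_name name (standardize_layer_name name)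


-- ===== LEMMAS AND PROOFS =====

def pvRepl (o : Char) (os new : List Char) : List Char → List Char
  | [] => []
  | c :: t =>
    if (o :: os).isPrefixOf (c :: t) then new ++ pvRepl o os new (t.drop os.length)
    else c :: pvRepl o os new t
termination_by s => s.length
decreasing_by
  all_goals simp [List.length_drop]

theorem pvRepl_nil (o : Char) (os new : List Char) : pvRepl o os new [] = [] := by
  simp [pvRepl]

theorem pvRepl_cons (o : Char) (os new : List Char) (c : Char) (t : List Char) :
    pvRepl o os new (c :: t) =
      if (o :: os).isPrefixOf (c :: t) then new ++ pvRepl o os new (t.drop os.length)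
      else c :: pvRepl o os new t := by
  rw [pvRepl]

theorem pvRepl_fire (o : Char) (os new X : List Char) :
    pvRepl o os new ((o :: os) ++ X) = new ++ pvRepl o os new X := by
  rw [List.cons_append, pvRepl_cons, if_pos, List.drop_left]
  · rw [List.isPrefixOf_iff_prefix]
    exact ⟨X, by simp⟩

theorem pvRepl_skip (o : Char) (os new : List Char) (c : Char) (t : List Char)
    (h : ¬ (o :: os) <+: (c :: t)) : pvRepl o os new (c :: t) = c :: pvRepl o os new t := by
  rw [pvRepl_cons, if_neg]
  simpa [List.isPrefixOf_iff_prefix] using h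

theorem pvReplGo (o : Char) (os new : List Char) :
    ∀ (fuel : Nat) (l acc : List Char), l.length ≤ fuel →
      PySem.Chars.replace.go (o :: os) new fuel l acc = acc.reverse ++ pvRepl o os new l := by
  intro fuel
  induction fuel with
  | zero =>
    intro l acc h
    have : l = [] := by cases l <;> simp at h ⊢
    subst this; simp [PySem.Chars.replace.go, pvRepl_nil]
  | succ fuel ih =>
    intro l acc h
    cases l with
    | nil => simp [PySem.Chars.replace.go, pvRepl_nil]
    | cons c t =>
      have hstep : PySem.Chars.replace.go (o::os) new (fuel+1) (c::t) acc =
          (if (o::os).isPrefixOf (c::t) then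
            PySem.Chars.replace.go (o::os) new fuel (List.drop (o::os).length (c::t)) (new.reverse ++ acc)
          else PySem.Chars.replace.go (o::os) new fuel t (c::acc)) := rfl
      rw [hstep]
      by_cases hp : (o::os).isPrefixOf (c::t)
      · rw [if_pos hp]
        have hd : List.drop (o::os).length (c::t) = t.drop os.length := by simp
        rw [hd, ih _ _ (by simp at h ⊢; omega)]
        rw [pvRepl_cons, if_pos hp]
        simp
      · rw [if_neg hp, ih _ _ (by simp at h; omega)]
        rw [pvRepl_cons, if_neg hp]
        simp

theorem replace_eq_pvRepl (o : Char) (os new l : List Char) :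
    PySem.Chars.replace l (o :: os) new = pvRepl o os new l := by
  rw [PySem.Chars.replace]
  simp [pvReplGo o os new l.length l [] (le_refl _)]

theorem join_pair_merge (sep : List Char) (X : List (List Char)) (u w : List Char) :
    PySem.Chars.join sep (X ++ [u, w]) = PySem.Chars.join sep (X ++ [u ++ sep ++ w]) := by
  induction X with
  | nil => simp [PySem.Chars.join_cons_cons, PySem.Chars.join_singleton]
  | cons x xs ih =>
    cases xs with
    | nil => simp [PySem.Chars.join_cons_cons, PySem.Chars.join_singleton]
    | cons y ys =>
      simp only [List.cons_append, PySem.Chars.join_cons_cons] at ih ⊢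
      rw [ih]

theorem splitOnGo_join (sep : List Char) (s0 : Char) (ss : List Char) (hsep : sep = s0 :: ss) :
    ∀ (fuel : Nat) (l cur : List Char) (acc : List (List Char)), l.length < fuel →
      PySem.Chars.join sep (PySem.Chars.splitOn.go sep fuel l cur acc) =
        PySem.Chars.join sep (acc.reverse ++ [cur.reverse ++ l]) := by
  intro fuel
  induction fuel with
  | zero => intro l cur acc h; omega
  | succ fuel ih =>
    intro l cur acc h
    cases l with
    | nil =>
      have : PySem.Chars.splitOn.go sep (fuel+1) [] cur acc = (cur.reverse :: acc).reverse := rfl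
      rw [this]; simp
    | cons c t =>
      have hstep : PySem.Chars.splitOn.go sep (fuel+1) (c::t) cur acc =
          (if sep.isPrefixOf (c::t) then
            PySem.Chars.splitOn.go sep fuel (List.drop sep.length (c::t)) [] (cur.reverse :: acc)
          else PySem.Chars.splitOn.go sep fuel t (c :: cur) acc) := rfl
      rw [hstep]
      by_cases hp : sep.isPrefixOf (c::t)
      · rw [if_pos hp]
        have hpre : sep <+: (c::t) := List.isPrefixOf_iff_prefix.mp hp
        obtain ⟨r, hr⟩ := hpre
        have hdl : List.drop sep.length (c::t) = r := by rw [← hr, List.drop_left]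
        have hlen : r.length < fuel := by
          have := congrArg List.length hr
          simp [hsep] at this h; omega
        rw [hdl, ih r [] (cur.reverse :: acc) hlen]
        have : (cur.reverse :: acc).reverse ++ [List.reverse [] ++ r]
             = acc.reverse ++ [cur.reverse] ++ [r] := by simp
        rw [this]
        have := join_pair_merge sep acc.reverse cur.reverse r
        simp only [List.append_assoc] at this ⊢
        rw [show acc.reverse ++ ([cur.reverse] ++ [r]) = acc.reverse ++ [cur.reverse, r] from rfl, this]
        rw [← hr]
      · rw [if_neg hp, ih t (c :: cur) acc (by simp at h ⊢; omega)]
        simp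

theorem join_splitOn (sep : List Char) (s0 : Char) (ss : List Char) (hsep : sep = s0 :: ss)
    (s : List Char) :
    PySem.Chars.join sep (PySem.Chars.splitOn s sep) = s := by
  rw [PySem.Chars.splitOn, splitOnGo_join sep s0 ss hsep _ _ _ _ (by omega)]
  simp [PySem.Chars.join_singleton]

theorem prefix_of_append_sep (k x y : List Char) (hk : ('.' : Char) ∉ k)
    (h : k <+: x ++ '.' :: y) : k <+: x := by
  obtain ⟨r, hr⟩ := h
  by_cases hlen : k.length ≤ x.length
  · have ht : x.take k.length = k := by
      have h2 := congrArg (List.take k.length) hr.symm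
      rwa [List.take_append_of_le_length hlen, List.take_left] at h2
    exact ht ▸ List.take_prefix _ _
  · exfalso
    have hx : x.length < k.length := by omega
    have h1 : (x ++ '.' :: y)[x.length]'(by simp) = '.' := by
      rw [List.getElem_append_right (le_refl _)]
      simp
    have h2 : (x ++ '.' :: y)[x.length]'(by simp) = k[x.length]'hx := by
      rw [List.getElem_of_eq hr.symm]
      exact List.getElem_append_left _
    apply hk
    rw [h1] at h2
    exact h2 ▸ List.getElem_mem _

theorem pvRepl_sep_aux (o : Char) (os new : List Char) (hdot : ('.' : Char) ∉ o :: os) :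
    ∀ (n : Nat) (x : List Char), x.length ≤ n → ∀ (y : List Char),
      pvRepl o os new (x ++ '.' :: y) = pvRepl o os new x ++ '.' :: pvRepl o os new y := by
  intro n
  induction n with
  | zero =>
    intro x hx y
    have : x = [] := by cases x <;> simp at hx ⊢
    subst this
    rw [List.nil_append, pvRepl_nil, List.nil_append, pvRepl_skip]
    intro h
    obtain ⟨r, hr⟩ := h
    rw [List.cons_append] at hr
    injection hr with h1 _
    exact hdot (by rw [← h1]; exact List.mem_cons_self)
  | succ n ih =>
    intro x hx y
    cases x with
    | nil =>
      rw [List.nil_append, pvRepl_nil, List.nil_append, pvRepl_skip]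
      intro h
      obtain ⟨r, hr⟩ := h
      rw [List.cons_append] at hr
      injection hr with h1 _
      exact hdot (by rw [← h1]; exact List.mem_cons_self)
    | cons c x' =>
      by_cases hk : (o :: os) <+: (c :: x')
      · obtain ⟨x'', hx2⟩ := hk
        rw [← hx2, List.append_assoc, pvRepl_fire, pvRepl_fire]
        have hlen : x''.length ≤ n := by
          have := congrArg List.length hx2
          simp at this hx; omega
        rw [ih x'' hlen y, List.append_assoc]
      · have hk2 : ¬ (o :: os) <+: (c :: (x' ++ '.' :: y)) := by
          intro h
          exact hk (prefix_of_append_sep _ _ _ hdot (by rwa [List.cons_append]))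
        rw [List.cons_append, pvRepl_skip _ _ _ _ _ hk2, pvRepl_skip _ _ _ _ _ hk,
          ih x' (by simp at hx; omega) y, List.cons_append]

theorem join_map_pvRepl (o : Char) (os new : List Char) (hdot : ('.' : Char) ∉ o :: os) :
    ∀ (parts : List (List Char)),
      PySem.Chars.join ['.'] (parts.map (pvRepl o os new)) =
        pvRepl o os new (PySem.Chars.join ['.'] parts) := by
  intro parts
  induction parts with
  | nil => simp [PySem.Chars.join_nil, pvRepl_nil]
  | cons p ps ih =>
    cases ps with
    | nil => simp [PySem.Chars.join_singleton]
    | cons q qs =>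
      rw [List.map_cons, List.map_cons, PySem.Chars.join_cons_cons]
      have ih' : PySem.Chars.join ['.'] (pvRepl o os new q :: List.map (pvRepl o os new) qs)
          = pvRepl o os new (PySem.Chars.join ['.'] (q :: qs)) := by
        rw [← List.map_cons]; exact ih
      rw [ih', PySem.Chars.join_cons_cons]
      rw [show p ++ ['.'] ++ PySem.Chars.join ['.'] (q :: qs)
            = p ++ '.' :: PySem.Chars.join ['.'] (q :: qs) by simp]
      rw [pvRepl_sep_aux o os new hdot p.length p (le_refl _)]
      simp

theorem pvRepl_skip_many (o : Char) (os new : List Char) :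
    ∀ (a X : List Char), (∀ i, i < a.length → ¬ (o :: os) <+: (a.drop i ++ X)) →
      pvRepl o os new (a ++ X) = a ++ pvRepl o os new X := by
  intro a
  induction a with
  | nil => intro X h; simp
  | cons c a' ih =>
    intro X h
    rw [List.cons_append, pvRepl_skip _ _ _ _ _ (by simpa using h 0 (by simp))]
    rw [ih X (fun i hi => by simpa using h (i+1) (by simp; omega))]
    simp

theorem pvRepl_prefix (o : Char) (os : List Char) (b : Char) (nr : List Char) :
    ∀ (n : Nat) (u w : List Char), u.length ≤ n → b ∉ w →
      w <+: pvRepl o os (b :: nr) u → w <+: u := by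
  intro n
  induction n with
  | zero =>
    intro u w hu hb h
    have : u = [] := by cases u <;> simp at hu ⊢
    subst this; rwa [pvRepl_nil] at h
  | succ n ih =>
    intro u w hu hb h
    cases u with
    | nil => rwa [pvRepl_nil] at h
    | cons c t =>
      by_cases hk : (o :: os) <+: (c :: t)
      · rw [pvRepl_cons, if_pos (List.isPrefixOf_iff_prefix.mpr hk)] at h
        cases w with
        | nil => exact List.nil_prefix
        | cons w0 w' =>
          rw [List.cons_append, List.cons_prefix_cons] at h
          exact absurd (h.1 ▸ List.mem_cons_self) hb
      · rw [pvRepl_skip _ _ _ _ _ hk] at h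
        cases w with
        | nil => exact List.nil_prefix
        | cons w0 w' =>
          rw [List.cons_prefix_cons] at h ⊢
          refine ⟨h.1, ih t w' (by simp at hu; omega) (fun hm => hb (List.mem_cons_of_mem _ hm)) h.2⟩

def pvChain (s : List Char) : List Char :=
  pvRepl 's' ['p','i','k','e'] ['a','c','t']
    (pvRepl 'l' ['a','y','e','r','4'] ['b','l','o','c','k','4']
      (pvRepl 'l' ['a','y','e','r','3'] ['b','l','o','c','k','3']
        (pvRepl 'l' ['a','y','e','r','2'] ['b','l','o','c','k','2']
          (pvRepl 'l' ['a','y','e','r','1'] ['b','l','o','c','k','1'] s))))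

theorem pvChain_case1 (u : List Char) :
    pvChain (['l','a','y','e','r','1'] ++ u) = ['b','l','o','c','k','1'] ++ pvChain u := by
  unfold pvChain
  rw [pvRepl_fire]
  rw [pvRepl_skip_many 'l' ['a','y','e','r','2'] ['b','l','o','c','k','2'] ['b','l','o','c','k','1'] _ (by intro i hi; simp only [List.length_cons, List.length_nil] at hi; interval_cases i <;> simp [List.cons_prefix_cons])]
  rw [pvRepl_skip_many 'l' ['a','y','e','r','3'] ['b','l','o','c','k','3'] ['b','l','o','c','k','1'] _ (by intro i hi; simp only [List.length_cons, List.length_nil] at hi; interval_cases i <;> simp [List.cons_prefix_cons])]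
  rw [pvRepl_skip_many 'l' ['a','y','e','r','4'] ['b','l','o','c','k','4'] ['b','l','o','c','k','1'] _ (by intro i hi; simp only [List.length_cons, List.length_nil] at hi; interval_cases i <;> simp [List.cons_prefix_cons])]
  rw [pvRepl_skip_many 's' ['p','i','k','e'] ['a','c','t'] ['b','l','o','c','k','1'] _ (by intro i hi; simp only [List.length_cons, List.length_nil] at hi; interval_cases i <;> simp [List.cons_prefix_cons])]

theorem pvScan_case1 (u : List Char) :
    pvScan (['l','a','y','e','r','1'] ++ u) = ['b','l','o','c','k','1'] ++ pvScan u := by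
  rw [List.cons_append, pvScan]
  simp [List.isPrefixOf]

theorem pvChain_case2 (u : List Char) :
    pvChain (['l','a','y','e','r','2'] ++ u) = ['b','l','o','c','k','2'] ++ pvChain u := by
  unfold pvChain
  rw [pvRepl_skip_many 'l' ['a','y','e','r','1'] ['b','l','o','c','k','1'] ['l','a','y','e','r','2'] _ (by intro i hi; simp only [List.length_cons, List.length_nil] at hi; interval_cases i <;> simp [List.cons_prefix_cons])]
  rw [pvRepl_fire]
  rw [pvRepl_skip_many 'l' ['a','y','e','r','3'] ['b','l','o','c','k','3'] ['b','l','o','c','k','2'] _ (by intro i hi; simp only [List.length_cons, List.length_nil] at hi; interval_cases i <;> simp [List.cons_prefix_cons])]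
  rw [pvRepl_skip_many 'l' ['a','y','e','r','4'] ['b','l','o','c','k','4'] ['b','l','o','c','k','2'] _ (by intro i hi; simp only [List.length_cons, List.length_nil] at hi; interval_cases i <;> simp [List.cons_prefix_cons])]
  rw [pvRepl_skip_many 's' ['p','i','k','e'] ['a','c','t'] ['b','l','o','c','k','2'] _ (by intro i hi; simp only [List.length_cons, List.length_nil] at hi; interval_cases i <;> simp [List.cons_prefix_cons])]

theorem pvScan_case2 (u : List Char) :
    pvScan (['l','a','y','e','r','2'] ++ u) = ['b','l','o','c','k','2'] ++ pvScan u := by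
  rw [List.cons_append, pvScan]
  simp [List.isPrefixOf]

theorem pvChain_case3 (u : List Char) :
    pvChain (['l','a','y','e','r','3'] ++ u) = ['b','l','o','c','k','3'] ++ pvChain u := by
  unfold pvChain
  rw [pvRepl_skip_many 'l' ['a','y','e','r','1'] ['b','l','o','c','k','1'] ['l','a','y','e','r','3'] _ (by intro i hi; simp only [List.length_cons, List.length_nil] at hi; interval_cases i <;> simp [List.cons_prefix_cons])]
  rw [pvRepl_skip_many 'l' ['a','y','e','r','2'] ['b','l','o','c','k','2'] ['l','a','y','e','r','3'] _ (by intro i hi; simp only [List.length_cons, List.length_nil] at hi; interval_cases i <;> simp [List.cons_prefix_cons])]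
  rw [pvRepl_fire]
  rw [pvRepl_skip_many 'l' ['a','y','e','r','4'] ['b','l','o','c','k','4'] ['b','l','o','c','k','3'] _ (by intro i hi; simp only [List.length_cons, List.length_nil] at hi; interval_cases i <;> simp [List.cons_prefix_cons])]
  rw [pvRepl_skip_many 's' ['p','i','k','e'] ['a','c','t'] ['b','l','o','c','k','3'] _ (by intro i hi; simp only [List.length_cons, List.length_nil] at hi; interval_cases i <;> simp [List.cons_prefix_cons])]

theorem pvScan_case3 (u : List Char) :
    pvScan (['l','a','y','e','r','3'] ++ u) = ['b','l','o','c','k','3'] ++ pvScan u := by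
  rw [List.cons_append, pvScan]
  simp [List.isPrefixOf]

theorem pvChain_case4 (u : List Char) :
    pvChain (['l','a','y','e','r','4'] ++ u) = ['b','l','o','c','k','4'] ++ pvChain u := by
  unfold pvChain
  rw [pvRepl_skip_many 'l' ['a','y','e','r','1'] ['b','l','o','c','k','1'] ['l','a','y','e','r','4'] _ (by intro i hi; simp only [List.length_cons, List.length_nil] at hi; interval_cases i <;> simp [List.cons_prefix_cons])]
  rw [pvRepl_skip_many 'l' ['a','y','e','r','2'] ['b','l','o','c','k','2'] ['l','a','y','e','r','4'] _ (by intro i hi; simp only [List.length_cons, List.length_nil] at hi; interval_cases i <;> simp [List.cons_prefix_cons])]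
  rw [pvRepl_skip_many 'l' ['a','y','e','r','3'] ['b','l','o','c','k','3'] ['l','a','y','e','r','4'] _ (by intro i hi; simp only [List.length_cons, List.length_nil] at hi; interval_cases i <;> simp [List.cons_prefix_cons])]
  rw [pvRepl_fire]
  rw [pvRepl_skip_many 's' ['p','i','k','e'] ['a','c','t'] ['b','l','o','c','k','4'] _ (by intro i hi; simp only [List.length_cons, List.length_nil] at hi; interval_cases i <;> simp [List.cons_prefix_cons])]

theorem pvScan_case4 (u : List Char) :
    pvScan (['l','a','y','e','r','4'] ++ u) = ['b','l','o','c','k','4'] ++ pvScan u := by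
  rw [List.cons_append, pvScan]
  simp [List.isPrefixOf]

theorem pvChain_case5 (u : List Char) :
    pvChain (['s','p','i','k','e'] ++ u) = ['a','c','t'] ++ pvChain u := by
  unfold pvChain
  rw [pvRepl_skip_many 'l' ['a','y','e','r','1'] ['b','l','o','c','k','1'] ['s','p','i','k','e'] _ (by intro i hi; simp only [List.length_cons, List.length_nil] at hi; interval_cases i <;> simp [List.cons_prefix_cons])]
  rw [pvRepl_skip_many 'l' ['a','y','e','r','2'] ['b','l','o','c','k','2'] ['s','p','i','k','e'] _ (by intro i hi; simp only [List.length_cons, List.length_nil] at hi; interval_cases i <;> simp [List.cons_prefix_cons])]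
  rw [pvRepl_skip_many 'l' ['a','y','e','r','3'] ['b','l','o','c','k','3'] ['s','p','i','k','e'] _ (by intro i hi; simp only [List.length_cons, List.length_nil] at hi; interval_cases i <;> simp [List.cons_prefix_cons])]
  rw [pvRepl_skip_many 'l' ['a','y','e','r','4'] ['b','l','o','c','k','4'] ['s','p','i','k','e'] _ (by intro i hi; simp only [List.length_cons, List.length_nil] at hi; interval_cases i <;> simp [List.cons_prefix_cons])]
  rw [pvRepl_fire]

theorem pvScan_case5 (u : List Char) :
    pvScan (['s','p','i','k','e'] ++ u) = ['a','c','t'] ++ pvScan u := by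
  rw [List.cons_append, pvScan]
  simp [List.isPrefixOf]

theorem pvScan_skip (c : Char) (t : List Char)
    (h1 : ¬ ['l','a','y','e','r','1'] <+: (c :: t))
    (h2 : ¬ ['l','a','y','e','r','2'] <+: (c :: t))
    (h3 : ¬ ['l','a','y','e','r','3'] <+: (c :: t))
    (h4 : ¬ ['s','p','i','k','e'] <+: (c :: t))
    (h5 : ¬ ['l','a','y','e','r','4'] <+: (c :: t)) :
    pvScan (c :: t) = c :: pvScan t := by
  rw [pvScan]
  simp [List.isPrefixOf_iff_prefix, h1, h2, h3, h4, h5]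

theorem pvChain_skip (c : Char) (t : List Char)
    (h1 : ¬ ['l','a','y','e','r','1'] <+: (c :: t))
    (h2 : ¬ ['l','a','y','e','r','2'] <+: (c :: t))
    (h3 : ¬ ['l','a','y','e','r','3'] <+: (c :: t))
    (h4 : ¬ ['l','a','y','e','r','4'] <+: (c :: t))
    (h5 : ¬ ['s','p','i','k','e'] <+: (c :: t)) :
    pvChain (c :: t) = c :: pvChain t := by
  have n2 : ¬ ['l','a','y','e','r','2'] <+: (c :: (pvRepl 'l' ['a','y','e','r','1'] ['b','l','o','c','k','1'] t)) := by
    intro h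
    rw [List.cons_prefix_cons] at h
    exact h2 (List.cons_prefix_cons.mpr ⟨h.1, (pvRepl_prefix 'l' ['a','y','e','r','1'] 'b' ['l','o','c','k','1'] (t).length t ['a','y','e','r','2'] (le_refl _) (by decide) h.2)⟩)
  have n3 : ¬ ['l','a','y','e','r','3'] <+: (c :: (pvRepl 'l' ['a','y','e','r','2'] ['b','l','o','c','k','2'] (pvRepl 'l' ['a','y','e','r','1'] ['b','l','o','c','k','1'] t))) := by
    intro h
    rw [List.cons_prefix_cons] at h
    exact h3 (List.cons_prefix_cons.mpr ⟨h.1, (pvRepl_prefix 'l' ['a','y','e','r','1'] 'b' ['l','o','c','k','1'] (t).length t ['a','y','e','r','3'] (le_refl _) (by decide) (pvRepl_prefix 'l' ['a','y','e','r','2'] 'b' ['l','o','c','k','2'] ((pvRepl 'l' ['a','y','e','r','1'] ['b','l','o','c','k','1'] t)).length (pvRepl 'l' ['a','y','e','r','1'] ['b','l','o','c','k','1'] t) ['a','y','e','r','3'] (le_refl _) (by decide) h.2))⟩)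
  have n4 : ¬ ['l','a','y','e','r','4'] <+: (c :: (pvRepl 'l' ['a','y','e','r','3'] ['b','l','o','c','k','3'] (pvRepl 'l' ['a','y','e','r','2'] ['b','l','o','c','k','2'] (pvRepl 'l' ['a','y','e','r','1'] ['b','l','o','c','k','1'] t)))) := by
    intro h
    rw [List.cons_prefix_cons] at h
    exact h4 (List.cons_prefix_cons.mpr ⟨h.1, (pvRepl_prefix 'l' ['a','y','e','r','1'] 'b' ['l','o','c','k','1'] (t).length t ['a','y','e','r','4'] (le_refl _) (by decide) (pvRepl_prefix 'l' ['a','y','e','r','2'] 'b' ['l','o','c','k','2'] ((pvRepl 'l' ['a','y','e','r','1'] ['b','l','o','c','k','1'] t)).length (pvRepl 'l' ['a','y','e','r','1'] ['b','l','o','c','k','1'] t) ['a','y','e','r','4'] (le_refl _) (by decide) (pvRepl_prefix 'l' ['a','y','e','r','3'] 'b' ['l','o','c','k','3'] ((pvRepl 'l' ['a','y','e','r','2'] ['b','l','o','c','k','2'] (pvRepl 'l' ['a','y','e','r','1'] ['b','l','o','c','k','1'] t))).length (pvRepl 'l' ['a','y','e','r','2'] ['b','l','o','c','k','2'] (pvRepl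 'l' ['a','y','e','r','1'] ['b','l','o','c','k','1'] t)) ['a','y','e','r','4'] (le_refl _) (by decide) h.2)))⟩)
  have n5 : ¬ ['s','p','i','k','e'] <+: (c :: (pvRepl 'l' ['a','y','e','r','4'] ['b','l','o','c','k','4'] (pvRepl 'l' ['a','y','e','r','3'] ['b','l','o','c','k','3'] (pvRepl 'l' ['a','y','e','r','2'] ['b','l','o','c','k','2'] (pvRepl 'l' ['a','y','e','r','1'] ['b','l','o','c','k','1'] t))))) := by
    intro h
    rw [List.cons_prefix_cons] at h
    exact h5 (List.cons_prefix_cons.mpr ⟨h.1, (pvRepl_prefix 'l' ['a','y','e','r','1'] 'b' ['l','o','c','k','1'] (t).length t ['p','i','k','e'] (le_refl _) (by decide) (pvRepl_prefix 'l' ['a','y','e','r','2'] 'b' ['l','o','c','k','2'] ((pvRepl 'l' ['a','y','e','r','1'] ['b','l','o','c','k','1'] t)).length (pvRepl 'l' ['a','y','e','r','1'] ['b','l','o','c','k','1'] t) ['p','i','k','e'] (le_refl _) (by decide) (pvRepl_prefix 'l' ['a','y','e','r','3'] 'b' ['l','o','c','k','3'] ((pvRepl 'l' ['a','y','e','r','2']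 ['b','l','o','c','k','2'] (pvRepl 'l' ['a','y','e','r','1'] ['b','l','o','c','k','1'] t))).length (pvRepl 'l' ['a','y','e','r','2'] ['b','l','o','c','k','2'] (pvRepl 'l' ['a','y','e','r','1'] ['b','l','o','c','k','1'] t)) ['p','i','k','e'] (le_refl _) (by decide) (pvRepl_prefix 'l' ['a','y','e','r','4'] 'b' ['l','o','c','k','4'] ((pvRepl 'l' ['a','y','e','r','3'] ['b','l','o','c','k','3'] (pvRepl 'l' ['a','y','e','r','2'] ['b','l','o','c','k','2'] (pvRepl 'l' ['a','y','e','r','1'] ['b','l','o','c','k','1'] t)))).length (pvRepl 'l' ['a','y','e','r','3'] ['b','l','o','c','k','3'] (pvRepl 'l' ['a','y','e','r','2'] ['b','l','o','c','k','2'] (pvRepl 'l' ['a','y','e','r','1'] ['b','l','o','c','k','1'] t))) ['p','i','k','e'] (le_refl _) (by decide) h.2))))⟩)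
  unfold pvChain
  rw [pvRepl_skip _ _ _ _ _ h1, pvRepl_skip _ _ _ _ _ n2, pvRepl_skip _ _ _ _ _ n3,
    pvRepl_skip _ _ _ _ _ n4, pvRepl_skip _ _ _ _ _ n5]

theorem pvChain_eq_pvScan : ∀ (n : Nat) (s : List Char), s.length ≤ n → pvChain s = pvScan s := by
  intro n
  induction n with
  | zero =>
    intro s h
    have : s = [] := by cases s <;> simp at h ⊢
    subst this
    unfold pvChain
    simp [pvRepl_nil, pvScan]
  | succ n ih =>
    intro s hs
    cases s with
    | nil =>
      unfold pvChain
      simp [pvRepl_nil, pvScan]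
    | cons c t =>
      by_cases h1 : ['l','a','y','e','r','1'] <+: (c :: t)
      · obtain ⟨u, hu⟩ := h1
        rw [← hu, pvChain_case1, pvScan_case1,
          ih u (by have := congrArg List.length hu; simp at this hs; omega)]
      by_cases h2 : ['l','a','y','e','r','2'] <+: (c :: t)
      · obtain ⟨u, hu⟩ := h2
        rw [← hu, pvChain_case2, pvScan_case2,
          ih u (by have := congrArg List.length hu; simp at this hs; omega)]
      by_cases h3 : ['l','a','y','e','r','3'] <+: (c :: t)
      · obtain ⟨u, hu⟩ := h3
        rw [← hu, pvChain_case3, pvScan_case3,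
          ih u (by have := congrArg List.length hu; simp at this hs; omega)]
      by_cases h4 : ['l','a','y','e','r','4'] <+: (c :: t)
      · obtain ⟨u, hu⟩ := h4
        rw [← hu, pvChain_case4, pvScan_case4,
          ih u (by have := congrArg List.length hu; simp at this hs; omega)]
      by_cases h5 : ['s','p','i','k','e'] <+: (c :: t)
      · obtain ⟨u, hu⟩ := h5
        rw [← hu, pvChain_case5, pvScan_case5,
          ih u (by have := congrArg List.length hu; simp at this hs; omega)]
      · rw [pvChain_skip c t h1 h2 h3 h4 h5, pvScan_skip c t h1 h2 h3 h5 h4,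
          ih t (by simp at hs; omega)]

theorem pvToList1 : "layer1".toList = ['l','a','y','e','r','1'] := by decide
theorem pvToList2 : "layer2".toList = ['l','a','y','e','r','2'] := by decide
theorem pvToList3 : "layer3".toList = ['l','a','y','e','r','3'] := by decide
theorem pvToList4 : "layer4".toList = ['l','a','y','e','r','4'] := by decide
theorem pvToList5 : "spike".toList = ['s','p','i','k','e'] := by decide
theorem pvToListB1 : "block1".toList = ['b','l','o','c','k','1'] := by decide
theorem pvToListB2 : "block2".toList = ['b','l','o','c','k','2'] := by decide
theorem pvToListB3 : "block3".toList = ['b','l','o','c','k','3'] := by decide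
theorem pvToListB4 : "block4".toList = ['b','l','o','c','k','4'] := by decide
theorem pvToListB5 : "act".toList = ['a','c','t'] := by decide

theorem standardize_layer_name_spec : Claim_equal_standardize_layer_name := by
  unfold Claim_equal_standardize_layer_name Spec_standardize_layer_name
  intro name _
  unfold standardize_layer_name standardize_layer_name_alt
  simp only [List.foldl_cons, List.foldl_nil, pvToList1, pvToList2, pvToList3, pvToList4,
    pvToList5, pvToListB1, pvToListB2, pvToListB3, pvToListB4, pvToListB5,
    replace_eq_pvRepl]
  rw [join_map_pvRepl 's' ['p','i','k','e'] ['a','c','t'] (by decide),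
    join_map_pvRepl 'l' ['a','y','e','r','4'] ['b','l','o','c','k','4'] (by decide),
    join_map_pvRepl 'l' ['a','y','e','r','3'] ['b','l','o','c','k','3'] (by decide),
    join_map_pvRepl 'l' ['a','y','e','r','2'] ['b','l','o','c','k','2'] (by decide),
    join_map_pvRepl 'l' ['a','y','e','r','1'] ['b','l','o','c','k','1'] (by decide),
    join_splitOn ['.'] '.' [] rfl name.toList]
  have h := pvChain_eq_pvScan name.toList.length name.toList (le_refl _)
  unfold pvChain at h
  rw [h]
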